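-- pv_equiv track=rewrite | github.com/navipilot/openpilot | selfdrive/ui/layouts/home.py | _reorder_sections_newest_first
-- ===== SOURCE A (Python) =====
-- def _reorder_sections_newest_first(content: str) -> str:
--   lines = content.splitlines()
--   intro: list[str] = []
--   sections: list[list[str]] = []
--   current: list[str] | None = None
--
--   for line in lines:
--     if line.startswith("## "):
--       if current is not None:
--         sections.append(current)
--       current = [line]
--     else:
--       if current is None:
--         intro.append(line)
--       else:
--         current.append(line)
--
--   if current is not None:
--     sections.append(current)
--
--   out: list[str] = []
--   if intro:
--     out.extend(intro)
--     out.append("")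
--
--   for i, section in enumerate(reversed(sections)):
--     out.extend(section)
--     if i != len(sections) - 1:
--       out.append("")
--
--   return "\n".join(out).strip()
-- ===== SOURCE B (Python) =====
-- def _reorder_sections_newest_first(content: str) -> str:
--   # Back-to-front single pass: walking the lines in reverse yields the sections
--   # already in newest-first order, each section joined into one block; the
--   # leftover tail at the end is the intro, prepended as the first block.
--   blocks: list[str] = []
--   tail: list[str] = []
--   for line in reversed(content.splitlines()):
--     tail = [line] + tail
--     if line.startswith("## "):
--       blocks.append("\n".join(tail))
--       tail = []
--   if tail:
--     blocks.insert(0, "\n".join(tail))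
--   return "\n\n".join(blocks).strip()
-- ===== Notes on version B (the rewrite author's own statement) =====
-- stated objective: alternative
-- what changed: Replaces the forward pass with an Option sentinel plus intro/sections lists and a flat enumerate-indexed reassembly by a single back-to-front pass that emits each section as one already-joined block in newest-first order and finally joins the blocks with a double newline.
import Mathlib
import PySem

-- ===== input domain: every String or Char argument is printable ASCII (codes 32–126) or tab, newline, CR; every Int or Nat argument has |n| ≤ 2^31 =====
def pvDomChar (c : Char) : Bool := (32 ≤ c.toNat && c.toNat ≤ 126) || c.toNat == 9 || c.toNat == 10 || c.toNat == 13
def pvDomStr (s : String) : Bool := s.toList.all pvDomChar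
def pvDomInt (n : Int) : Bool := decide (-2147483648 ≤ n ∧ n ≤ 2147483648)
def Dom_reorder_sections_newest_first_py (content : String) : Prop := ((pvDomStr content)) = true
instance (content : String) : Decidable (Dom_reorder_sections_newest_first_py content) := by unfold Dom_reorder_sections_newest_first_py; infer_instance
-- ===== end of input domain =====

-- B walks the lines back-to-front, emitting each section as one already-joined block
-- (newest first) and the leftover intro as a first block, instead of A's forward pass
-- with an Option sentinel and a flat enumerate-indexed reassembly (objective: alternative).

-- ===== PORT A =====
-- the body of A's 'for line in lines' loop (state = (intro, sections, current))
def pvStepA (st : List String × List (List String) × Option (List String)) (line : String) :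
    List String × List (List String) × Option (List String) :=
  if PySem.Str.startswith line "## " then
    match st.2.2 with
    | some cur => (st.1, st.2.1 ++ [cur], some [line])
    | none => (st.1, st.2.1, some [line])
  else
    match st.2.2 with
    | none => (st.1 ++ [line], st.2.1, none)
    | some cur => (st.1, st.2.1, some (cur ++ [line]))

def reorder_sections_newest_first_py (content : String) : String :=
  let lines := PySem.Str.splitlines content
  let st := lines.foldl pvStepA ([], [], none)
  let intro := st.1
  let sections : List (List String) :=
    match st.2.2 with
    | some cur => st.2.1 ++ [cur]
    | none => st.2.1
  let out0 : List String := if intro ≠ [] then intro ++ [""] else []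
  let out := (PySem.List.enumerate sections.reverse).foldl
      (fun out q =>
        let out := out ++ q.2
        if q.1 ≠ PySem.List.len sections - 1 then out ++ [""] else out) out0
  PySem.Str.strip (PySem.Str.join "\n" out)

-- ===== PORT B =====
-- the body of B's 'for line in reversed(...)' loop (state = (blocks, tail))
def pvStepB (st : List String × List String) (line : String) : List String × List String :=
  let tail := line :: st.2
  if PySem.Str.startswith line "## " then (st.1 ++ [PySem.Str.join "\n" tail], [])
  else (st.1, tail)

def reorder_sections_newest_first_py_alt (content : String) : String :=
  let st := (PySem.Str.splitlines content).reverse.foldl pvStepB ([], [])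
  let blocks := if st.2 ≠ [] then PySem.Str.join "\n" st.2 :: st.1 else st.1
  PySem.Str.strip (PySem.Str.join "\n\n" blocks)

-- ===== PRECONDITION & SPEC =====
def Spec_reorder_sections_newest_first_py (content : String) (out : String) : Prop := out = reorder_sections_newest_first_py_alt content
instance (content : String) (out : String) : Decidable (Spec_reorder_sections_newest_first_py content out) := by unfold Spec_reorder_sections_newest_first_py; infer_instance

-- ===== CLAIM (what is proved, stated in full; the proofs are below) =====
def Claim_equal_reorder_sections_newest_first_py : Prop := ∀ (content : String), Dom_reorder_sections_newest_first_py content → Spec_reorder_sections_newest_first_py content (reorder_sections_newest_first_py content)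

-- ===== LEMMAS AND PROOFS =====

-- sections of a line list continuing a currently open section `cur`
def pvGrp (cur : List String) : List String → List (List String)
  | [] => [cur]
  | l :: ls => if PySem.Str.startswith l "## " then cur :: pvGrp [l] ls else pvGrp (cur ++ [l]) ls

-- the (intro, sections) decomposition of a list of lines
def pvParse : List String → List String × List (List String)
  | [] => ([], [])
  | l :: ls =>
    if PySem.Str.startswith l "## " then ([], pvGrp [l] ls)
    else (l :: (pvParse ls).1, (pvParse ls).2)

-- A's loop state with the trailing `current` flushed
def pvFin (st : List String × List (List String) × Option (List String)) :
    List String × List (List String) :=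
  (st.1, match st.2.2 with | some c => st.2.1 ++ [c] | none => st.2.1)

-- flatten a list of blocks with one separator element between consecutive blocks
def pvSepFlatG {α : Type} (e : α) : List (List α) → List α
  | [] => []
  | [s] => s
  | s :: t :: r => s ++ e :: pvSepFlatG e (t :: r)

-- A's output as a function of (intro, sections)
def pvOutA (p : List String × List (List String)) : String :=
  PySem.Str.strip (PySem.Str.join "\n"
    ((PySem.List.enumerate p.2.reverse).foldl
      (fun out q => if q.1 ≠ PySem.List.len p.2 - 1 then (out ++ q.2) ++ [""] else out ++ q.2)
      (if p.1 ≠ [] then p.1 ++ [""] else [])))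

-- B's output as a function of its final (blocks, tail)
def pvOutB (p : List String × List String) : String :=
  PySem.Str.strip (PySem.Str.join "\n\n"
    (if p.2 ≠ [] then PySem.Str.join "\n" p.2 :: p.1 else p.1))

lemma pvStrExt {s t : String} (h : s.toList = t.toList) : s = t := by
  have h2 := congrArg String.ofList h
  simpa using h2

lemma pvA1 (ls : List String) : ∀ (i : List String) (s : List (List String)) (c : List String),
    pvFin (List.foldl pvStepA (i, s, some c) ls) = (i, s ++ pvGrp c ls) := by
  induction ls with
  | nil => intro i s c; simp [pvFin, pvGrp]
  | cons l ls ih =>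
    intro i s c
    by_cases h : PySem.Chars.startswith l.toList ['#', '#', ' '] = true
    · simp [pvStepA, h, ih, pvGrp]
    · simp [pvStepA, h, ih, pvGrp]

lemma pvA2 (ls : List String) : ∀ (i : List String),
    pvFin (List.foldl pvStepA (i, [], none) ls) = (i ++ (pvParse ls).1, (pvParse ls).2) := by
  induction ls with
  | nil => intro i; simp [pvFin, pvParse]
  | cons l ls ih =>
    intro i
    by_cases h : PySem.Chars.startswith l.toList ['#', '#', ' '] = true
    · simp [pvStepA, h, pvA1, pvParse]
    · simp [pvStepA, h, ih, pvParse]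

lemma pvG1 (ls : List String) : ∀ cur, pvGrp cur ls = (cur ++ (pvParse ls).1) :: (pvParse ls).2 := by
  induction ls with
  | nil => intro cur; simp [pvGrp, pvParse]
  | cons l ls ih =>
    intro cur
    by_cases h : PySem.Chars.startswith l.toList ['#', '#', ' '] = true
    · simp [pvGrp, h, pvParse, ih]
    · simp [pvGrp, h, pvParse, ih]

lemma pvBfoldr (ls : List String) :
    ls.foldr (fun line st => pvStepB st line) ([], []) =
      ((pvParse ls).2.reverse.map (PySem.Str.join "\n"), (pvParse ls).1) := by
  induction ls with
  | nil => simp [pvParse]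
  | cons l ls ih =>
    rw [List.foldr_cons, ih]
    by_cases h : PySem.Chars.startswith l.toList ['#', '#', ' '] = true
    · simp [pvStepB, h, pvParse, pvG1]
    · simp [pvStepB, h, pvParse]

lemma pvGrp_ne (ls : List String) : ∀ cur, cur ≠ [] → ∀ s ∈ pvGrp cur ls, s ≠ [] := by
  induction ls with
  | nil => intro cur hc s hs; simp [pvGrp] at hs; simpa [hs]
  | cons l ls ih =>
    intro cur hc s hs
    by_cases h : PySem.Chars.startswith l.toList ['#', '#', ' '] = true
    · simp [pvGrp, h] at hs
      rcases hs with hs | hs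
      · simpa [hs]
      · exact ih [l] (by simp) s hs
    · simp [pvGrp, h] at hs
      exact ih (cur ++ [l]) (by simp) s hs

lemma pvParse_ne (ls : List String) : ∀ s ∈ (pvParse ls).2, s ≠ [] := by
  induction ls with
  | nil => simp [pvParse]
  | cons l ls ih =>
    by_cases h : PySem.Chars.startswith l.toList ['#', '#', ' '] = true
    · simpa [pvParse, h] using pvGrp_ne ls [l] (by simp)
    · simpa [pvParse, h] using ih

lemma pvE (ts : List (List String)) : ∀ (k n : Int) (out0 : List String), n = k + ts.length →
    (PySem.List.enumerate ts k).foldl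
      (fun out q => if q.1 ≠ n - 1 then (out ++ q.2) ++ [""] else out ++ q.2) out0
      = out0 ++ pvSepFlatG "" ts := by
  induction ts with
  | nil => intro k n out0 _; simp [PySem.List.enumerate_nil, pvSepFlatG]
  | cons t ts ih =>
    intro k n out0 hn
    cases ts with
    | nil =>
      have hk : ¬ (k ≠ n - 1) := by simp at hn ⊢; omega
      simp [PySem.List.enumerate_cons, PySem.List.enumerate_nil, hk, pvSepFlatG]
    | cons t' r =>
      have hk : k ≠ n - 1 := by simp at hn; omega
      have hn' : n = (k + 1) + ((t' :: r).length : Int) := by simp at hn ⊢; omega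
      rw [PySem.List.enumerate_cons, List.foldl_cons, if_pos hk, ih (k + 1) n _ hn']
      simp [pvSepFlatG]

lemma pvSepFlatG_map {α β : Type} (f : α → β) (e : α) :
    ∀ ss : List (List α), (pvSepFlatG e ss).map f = pvSepFlatG (f e) (ss.map (List.map f)) := by
  intro ss
  induction ss with
  | nil => simp [pvSepFlatG]
  | cons s ts ih =>
    cases ts with
    | nil => simp [pvSepFlatG]
    | cons t r =>
      simp only [pvSepFlatG, List.map_append, List.map_cons] at ih ⊢
      simp [ih]

lemma pvSepFlatG_ne {α : Type} (e : α) (t : List α) (r : List (List α)) (ht : t ≠ []) :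
    pvSepFlatG e (t :: r) ≠ [] := by
  cases r with
  | nil => simpa [pvSepFlatG]
  | cons t' r' => simp [pvSepFlatG]

lemma pvJoinAppend (sep : List Char) : ∀ (xs ys : List (List Char)), xs ≠ [] → ys ≠ [] →
    PySem.Chars.join sep (xs ++ ys) = PySem.Chars.join sep xs ++ sep ++ PySem.Chars.join sep ys := by
  intro xs
  induction xs with
  | nil => intro ys h _; exact absurd rfl h
  | cons x xs ih =>
    intro ys _ hy
    cases xs with
    | nil =>
      obtain ⟨y, ys', rfl⟩ := List.exists_cons_of_ne_nil hy
      simp [PySem.Chars.join_cons_cons, PySem.Chars.join_singleton]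
    | cons x' xs' =>
      have h1 : (x :: x' :: xs') ++ ys = x :: x' :: (xs' ++ ys) := rfl
      have h2 : (x' :: (xs' ++ ys) : List (List Char)) = (x' :: xs') ++ ys := rfl
      rw [h1, PySem.Chars.join_cons_cons, h2, ih ys (by simp) hy,
        PySem.Chars.join_cons_cons]
      simp

lemma pvJ2C : ∀ css : List (List (List Char)), (∀ s ∈ css, s ≠ []) →
    PySem.Chars.join ['\n'] (pvSepFlatG ([] : List Char) css) =
      PySem.Chars.join ['\n', '\n'] (css.map (PySem.Chars.join ['\n'])) := by
  intro css
  induction css with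
  | nil => intro _; simp [pvSepFlatG, PySem.Chars.join_nil]
  | cons s ts ih =>
    intro hne
    cases ts with
    | nil => simp [pvSepFlatG, PySem.Chars.join_singleton]
    | cons t r =>
      have hs : s ≠ [] := hne s (by simp)
      have ht : t ≠ [] := hne t (by simp)
      have hflat : pvSepFlatG ([] : List Char) (t :: r) ≠ [] := pvSepFlatG_ne _ t r ht
      obtain ⟨f, fs, hf⟩ := List.exists_cons_of_ne_nil hflat
      have ihr := ih (by intro u hu; exact hne u (by simp [hu]))
      have h1 : pvSepFlatG ([] : List Char) (s :: t :: r)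
          = s ++ ([] :: pvSepFlatG ([] : List Char) (t :: r)) := rfl
      rw [h1, pvJoinAppend ['\n'] s _ hs (by simp), hf, PySem.Chars.join_cons_cons, ← hf, ihr]
      simp [PySem.Chars.join_cons_cons]

lemma pvStripNL (cs : List Char) : PySem.Chars.strip (cs ++ ['\n']) = PySem.Chars.strip cs := by
  have hsp : PySem.Chars.isspace '\n' = true := by decide
  by_cases he : List.dropWhile PySem.Chars.isspace cs = []
  · simp [PySem.Chars.strip, PySem.Chars.lstrip, PySem.Chars.rstrip, List.dropWhile_append, he, hsp]
  · simp [PySem.Chars.strip, PySem.Chars.lstrip, PySem.Chars.rstrip, List.dropWhile_append, he, hsp,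
      List.reverse_append]

lemma pvOutEq (intro : List String) (secs : List (List String)) (hsec : ∀ s ∈ secs, s ≠ []) :
    pvOutA (intro, secs) = pvOutB (secs.reverse.map (PySem.Str.join "\n"), intro) := by
  have hlen : (PySem.List.len secs : Int) = 0 + (secs.reverse.length : Int) := by
    simp [PySem.List.len]
  have hsecC : ∀ u ∈ secs.reverse.map (List.map String.toList), u ≠ [] := by
    intro u hu
    simp only [List.mem_map, List.mem_reverse] at hu
    obtain ⟨s, hsm, rfl⟩ := hu
    simpa using hsec s hsm
  apply pvStrExt
  simp only [pvOutA, pvOutB]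
  rw [pvE secs.reverse 0 (PySem.List.len secs) _ hlen]
  by_cases hi : intro = [] <;> by_cases hs : secs = []
  · subst hi; subst hs; rfl
  · -- intro = [], sections ≠ []
    subst hi
    simp only [ne_eq, not_true_eq_false, if_false, List.nil_append]
    simp only [PySem.Str.toList_strip, PySem.Str.toList_join,
      show ("\n" : String).toList = ['\n'] by decide,
      show ("\n\n" : String).toList = ['\n', '\n'] by decide]
    rw [pvSepFlatG_map String.toList ""]
    simp only [show ("" : String).toList = ([] : List Char) by decide]
    rw [pvJ2C _ hsecC]
    simp [List.map_map, Function.comp_def]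
  · -- intro ≠ [], sections = []
    subst hs
    simp only [List.reverse_nil, List.map_nil, ne_eq, hi, not_false_eq_true, if_true]
    have h0 : pvSepFlatG "" ([] : List (List String)) = [] := rfl
    rw [h0, List.append_nil]
    have hiC : intro.map String.toList ≠ [] := by simpa using hi
    simp only [PySem.Str.toList_strip, PySem.Str.toList_join, List.map_append, List.map_cons,
      List.map_nil,
      show ("\n" : String).toList = ['\n'] by decide,
      show ("\n\n" : String).toList = ['\n', '\n'] by decide,
      show ("" : String).toList = ([] : List Char) by decide]
    rw [pvJoinAppend ['\n'] _ _ hiC (by simp), PySem.Chars.join_singleton,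
      PySem.Chars.join_singleton, List.append_nil, pvStripNL]
  · -- intro ≠ [], sections ≠ []
    simp only [ne_eq, hi, not_false_eq_true, if_true]
    have hiC : intro.map String.toList ≠ [] := by simpa using hi
    obtain ⟨t, r, htr⟩ := List.exists_cons_of_ne_nil (show secs.reverse ≠ [] by simpa using hs)
    rw [htr] at hsecC ⊢
    have htC : List.map String.toList t ≠ [] := by
      have := hsecC (List.map String.toList t) (by simp)
      simpa using this
    have hflat : pvSepFlatG ([] : List Char) ((t :: r).map (List.map String.toList)) ≠ [] := by
      rw [List.map_cons]
      exact pvSepFlatG_ne _ _ _ htC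
    obtain ⟨f, fs, hf⟩ := List.exists_cons_of_ne_nil hflat
    simp only [PySem.Str.toList_strip, PySem.Str.toList_join, List.map_append,
      show ("\n" : String).toList = ['\n'] by decide,
      show ("\n\n" : String).toList = ['\n', '\n'] by decide]
    rw [pvSepFlatG_map String.toList ""]
    simp only [List.map_cons, List.map_nil,
      show ("" : String).toList = ([] : List Char) by decide]
    simp only [PySem.Str.toList_join, List.map_map, Function.comp_def,
      show ("\n" : String).toList = ['\n'] by decide]
    simp only [List.map_cons] at hsecC
    have hassoc2 : List.map String.toList intro ++ [([] : List Char)] ++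
          pvSepFlatG ([] : List Char)
            (List.map String.toList t :: List.map (List.map String.toList) r)
        = List.map String.toList intro ++
          (([] : List Char) :: pvSepFlatG ([] : List Char)
            (List.map String.toList t :: List.map (List.map String.toList) r)) := by
      simp
    rw [show (List.map (List.map String.toList) (t :: r)) =
        List.map String.toList t :: List.map (List.map String.toList) r from rfl] at hf
    rw [hassoc2, pvJoinAppend ['\n'] _ _ hiC (by simp), hf, PySem.Chars.join_cons_cons, ← hf,
      pvJ2C _ hsecC]
    simp [List.map_map, Function.comp_def, PySem.Chars.join_cons_cons]

-- ===== VERDICT (by name: the statement is the Claim_ definition above) =====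
theorem reorder_sections_newest_first_py_spec : Claim_equal_reorder_sections_newest_first_py := by
  intro c _
  unfold Spec_reorder_sections_newest_first_py
  have hA : reorder_sections_newest_first_py c
      = pvOutA (pvFin (List.foldl pvStepA ([], [], none) (PySem.Str.splitlines c))) := rfl
  have hB : reorder_sections_newest_first_py_alt c
      = pvOutB ((PySem.Str.splitlines c).reverse.foldl pvStepB ([], [])) := rfl
  rw [hA, hB, List.foldl_reverse, pvBfoldr, pvA2]
  simpa using pvOutEq (pvParse (PySem.Str.splitlines c)).1 (pvParse (PySem.Str.splitlines c)).2
    (pvParse_ne _)
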